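-- pv_equiv track=rewrite | github.com/asayenju/codesignal_practice | string_pattern.py | string_pattern_matching
-- ===== SOURCE A (Python) =====
-- vowels = {'a', 'e', 'i', 'o', 'u', 'y'}
--
-- def string_pattern_matching(source, pattern):
--     n, m = len(source), len(pattern)
--     if n < m:
--         return 0
--
--     count = 0
--     for i in range(n - m + 1):
--         match = True
--         for j in range(m):
--             is_vowel = source[i + j] in vowels
--             if (pattern[j] == '0' and not is_vowel) or (pattern[j] == '1' and is_vowel):
--                 match = False
--                 break
--         if match:
--             count += 1
--     return count
-- ===== SOURCE B (Python) =====
-- vowels = {'a', 'e', 'i', 'o', 'u', 'y'}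
--
-- def string_pattern_matching(source, pattern):
--     n, m = len(source), len(pattern)
--     if n < m:
--         return 0
--     # bitmask of vowel positions in source (bit i = source[i] is a vowel)
--     bits = ''.join('1' if c in vowels else '0' for c in source)
--     V = int(bits[::-1], 2) if n else 0
--     Vc = ((1 << n) - 1) ^ V          # complement within n bits
--     ok = (1 << (n - m + 1)) - 1      # candidate window starts, one bit each
--     j = 0
--     for p in pattern:
--         if p == '0':
--             ok &= V >> j             # '0' demands a vowel at offset j
--         elif p == '1':
--             ok &= Vc >> j            # '1' demands a consonant at offset j
--         j += 1
--     return bin(ok).count('1')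
-- ===== Notes on version B (the rewrite author's own statement) =====
-- stated objective: alternative
-- what changed: Replaces the nested sliding-window scan with bit-parallel matching: one pass binarizes the source into a vowel bitmask, each 0/1 pattern character ANDs a shifted (complemented) mask into a candidate-window bitset, and the answer is the popcount of that bitset.
import Mathlib
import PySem

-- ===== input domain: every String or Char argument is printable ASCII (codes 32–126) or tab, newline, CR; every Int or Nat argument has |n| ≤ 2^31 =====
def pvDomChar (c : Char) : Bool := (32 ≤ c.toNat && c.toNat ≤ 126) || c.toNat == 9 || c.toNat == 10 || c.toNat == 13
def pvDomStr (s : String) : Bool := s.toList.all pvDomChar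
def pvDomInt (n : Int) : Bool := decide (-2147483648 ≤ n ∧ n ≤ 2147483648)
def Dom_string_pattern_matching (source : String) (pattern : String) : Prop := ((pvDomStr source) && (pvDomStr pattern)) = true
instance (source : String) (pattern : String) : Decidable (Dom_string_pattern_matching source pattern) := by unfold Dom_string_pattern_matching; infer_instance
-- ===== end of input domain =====

-- B replaces the nested window scan by bit-parallel matching (vowel bitmask, shifted ANDs, popcount); proved equal to A on all inputs.

-- module constant: vowels = {'a','e','i','o','u','y'}
def pvVowels : List Char := ['a', 'e', 'i', 'o', 'u', 'y']

-- ===== PORT A =====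
-- inner 'for j in range(m)' loop with its break, returning 'match'
def smAInner (src pat : List Char) (i : Int) : List Int → Bool
  | [] => true
  | j :: js =>
      let isV := decide (PySem.List.pyGetD src (i + j) ' ' ∈ pvVowels)
      let pc := PySem.List.pyGetD pat j ' '
      if (pc == '0' && !isV) || (pc == '1' && isV) then false
      else smAInner src pat i js

def string_pattern_matching (source : String) (pattern : String) : Int :=
  let src := source.toList
  let pat := pattern.toList
  let n : Int := src.length
  let m : Int := pat.length
  if n < m then 0
  else
    (PySem.List.pyRange 0 (n - m + 1) 1).foldl
      (fun count i =>
        if smAInner src pat i (PySem.List.pyRange 0 m 1) then count + 1 else count) 0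

-- ===== PORT B =====
-- 'bin(ok).count("1")'
def smPopcount : Nat → Nat
  | 0 => 0
  | (k+1) => (k+1) % 2 + smPopcount ((k+1) / 2)
decreasing_by exact Nat.div_lt_self (Nat.succ_pos k) one_lt_two

-- 'for p in pattern: … ; j += 1'
def smBLoop (V Vc : Nat) : List Char → Nat → Nat → Nat
  | [], _, ok => ok
  | p :: ps, j, ok =>
      smBLoop V Vc ps (j + 1)
        (if p == '0' then ok &&& (V >>> j)
         else if p == '1' then ok &&& (Vc >>> j)
         else ok)

-- hand port of int(s, 2), exact for strings of '0'/'1' digits (the only strings B passes it)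
def smBin (l : List Char) : Nat :=
  l.foldl (fun a c => 2 * a + (if c == '1' then 1 else 0)) 0

def string_pattern_matching_alt (source : String) (pattern : String) : Int :=
  let src := source.toList
  let pat := pattern.toList
  let n := src.length
  let m := pat.length
  if (n : Int) < (m : Int) then 0
  else
    -- bits = ''.join('1' if c in vowels else '0' for c in source); V = int(bits[::-1], 2) if n else 0
    let bits := src.map (fun c => if c ∈ pvVowels then '1' else '0')
    let V := if n ≠ 0 then smBin bits.reverse else 0
    let Vc := ((1 <<< n) - 1) ^^^ V
    let ok := (1 <<< (n - m + 1)) - 1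
    (smPopcount (smBLoop V Vc pat 0 ok) : Int)

-- ===== PRECONDITION & SPEC =====
def Spec_string_pattern_matching (source : String) (pattern : String) (out : Int) : Prop := out = string_pattern_matching_alt source pattern
instance (source : String) (pattern : String) (out : Int) : Decidable (Spec_string_pattern_matching source pattern out) := by unfold Spec_string_pattern_matching; infer_instance

-- ===== CLAIM (what is proved, stated in full; the proofs are below) =====
def Claim_equal_string_pattern_matching : Prop := ∀ (source : String) (pattern : String), Dom_string_pattern_matching source pattern → Spec_string_pattern_matching source pattern (string_pattern_matching source pattern)

-- ===== LEMMAS AND PROOFS =====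

-- per-offset check as a Bool over Nat indices
def smOkb (src pat : List Char) (i t : Nat) : Bool :=
  let isV := decide (src.getD (i + t) ' ' ∈ pvVowels)
  let pc := pat.getD t ' '
  !((pc == '0' && !isV) || (pc == '1' && isV))

lemma smAInner_eq_all (src pat : List Char) (i : Int) (js : List Int) :
    smAInner src pat i js = js.all (fun j =>
      let isV := decide (PySem.List.pyGetD src (i + j) ' ' ∈ pvVowels)
      let pc := PySem.List.pyGetD pat j ' '
      !((pc == '0' && !isV) || (pc == '1' && isV))) := by
  induction js with
  | nil => rfl
  | cons j js ih =>
      simp only [smAInner, List.all_cons]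
      split_ifs with h
      · simp [h]
      · simp [h, ih]

lemma smAInner_range (src pat : List Char) (i : Nat) :
    smAInner src pat (i : Int) (PySem.List.pyRange 0 (pat.length : Int) 1)
      = (List.range pat.length).all (smOkb src pat i) := by
  rw [smAInner_eq_all, PySem.List.pyRange_one]
  have hlen : ((pat.length : Int) - 0).toNat = pat.length := by omega
  rw [hlen]
  simp only [List.all_map]
  refine List.all_congr rfl ?_
  intro t
  have h1 : (i : Int) + (t : Int) = ((i + t : Nat) : Int) := by push_cast; ring
  have h2 : ((0 : Int) + t) = ((t : Nat) : Int) := by ring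
  simp only [Function.comp, h2, h1, PySem.List.pyGetD_natCast, smOkb]

-- int(bits[::-1], 2): bit u of the result is digit u of bits
lemma smBin_rev_testBit : ∀ (l : List Char) (u : Nat),
    (smBin l.reverse).testBit u = (l.getD u '0' == '1') := by
  intro l
  induction l with
  | nil => intro u; simp [smBin]
  | cons c t ih =>
      intro u
      have hstep : smBin (c :: t).reverse
          = 2 * smBin t.reverse + (if c == '1' then 1 else 0) := by
        rw [List.reverse_cons, smBin, List.foldl_append]
        rfl
      rw [hstep]
      cases u with
      | zero =>
          rw [Nat.testBit_zero, List.getD_cons_zero]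
          rcases hc : c == '1' with _ | _ <;> simp [hc] <;> omega
      | succ u =>
          rw [Nat.testBit_add_one, List.getD_cons_succ]
          have hdiv : (2 * smBin t.reverse + (if c == '1' then 1 else 0)) / 2
              = smBin t.reverse := by
            split_ifs <;> omega
          rw [hdiv, ih u]

-- pattern loop: bit i of the result
def smBitCond (V Vc : Nat) (ps : List Char) (base t : Nat) : Bool :=
  let p := ps.getD t ' '
  if p == '0' then V.testBit (base + t)
  else if p == '1' then Vc.testBit (base + t)
  else true

lemma smBLoop_testBit (V Vc : Nat) : ∀ (ps : List Char) (j ok i : Nat),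
    (smBLoop V Vc ps j ok).testBit i
      = (ok.testBit i && (List.range ps.length).all (smBitCond V Vc ps (i + j))) := by
  intro ps
  induction ps with
  | nil => intro j ok i; simp [smBLoop]
  | cons p ps ih =>
      intro j ok i
      rw [smBLoop, ih]
      rw [List.length_cons, List.range_succ_eq_map, List.all_cons, List.all_map]
      have hhead : (if p == '0' then ok &&& (V >>> j)
          else if p == '1' then ok &&& (Vc >>> j) else ok).testBit i
          = (ok.testBit i && smBitCond V Vc (p :: ps) (i + j) 0) := by
        simp only [smBitCond, List.getD_cons_zero, Nat.add_zero]
        split_ifs with h1 h2 <;>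
          simp [Nat.testBit_and, Nat.testBit_shiftRight, Nat.add_comm j i]
      rw [hhead]
      have htail : ∀ t, smBitCond V Vc ps (i + (j + 1)) t
          = smBitCond V Vc (p :: ps) (i + j) (t + 1) := by
        intro t
        simp only [smBitCond, List.getD_cons_succ]
        have : i + (j + 1) + t = i + j + (t + 1) := by omega
        rw [this]
      have hcomp : (smBitCond V Vc (p :: ps) (i + j) ∘ Nat.succ)
          = (fun t => smBitCond V Vc ps (i + (j + 1)) t) := by
        funext t
        simp only [Function.comp, Nat.succ_eq_add_one]
        rw [htail]
      rw [hcomp, Bool.and_assoc]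

lemma smBLoop_le (V Vc : Nat) : ∀ (ps : List Char) (j ok : Nat), smBLoop V Vc ps j ok ≤ ok := by
  intro ps
  induction ps with
  | nil => intro j ok; exact le_refl ok
  | cons p ps ih =>
      intro j ok
      rw [smBLoop]
      refine le_trans (ih _ _) ?_
      split_ifs <;> first | exact Nat.and_le_left | exact le_refl ok

lemma smPopcount_eq_countP : ∀ (B x : Nat), x < 2^B →
    smPopcount x = (List.range B).countP (fun t => x.testBit t) := by
  intro B
  induction B with
  | zero =>
      intro x hx
      interval_cases x
      rw [smPopcount]
      rfl
  | succ B ih =>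
      intro x hx
      match x with
      | 0 => simp [smPopcount]
      | (k+1) =>
          rw [smPopcount]
          rw [List.range_succ_eq_map, List.countP_cons, List.countP_map]
          have hdiv : (k+1)/2 < 2^B := by
            have := Nat.pow_succ 2 B
            omega
          rw [ih _ hdiv]
          have hc : ((fun t => (k+1).testBit t) ∘ Nat.succ) = (fun t => ((k+1)/2).testBit t) := by
            funext t
            simp [Function.comp, Nat.testBit_add_one]
          rw [hc]
          have hb : (k+1).testBit 0 = decide ((k+1) % 2 = 1) := Nat.testBit_zero (k+1)
          rcases Nat.mod_two_eq_zero_or_one (k+1) with h | h <;>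
            simp [hb, h] <;> omega

-- the two per-window tests agree for windows/offsets in range
lemma smWindow_agree (src pat : List Char) (V Vc : Nat)
    (hm : pat.length ≤ src.length)
    (hV : ∀ u, u < src.length → V.testBit u = decide (src.getD u ' ' ∈ pvVowels))
    (hVc : ∀ u, u < src.length → Vc.testBit u = !V.testBit u)
    (i : Nat) (hi : i < src.length - pat.length + 1) :
    (List.range pat.length).all (smOkb src pat i)
      = (List.range pat.length).all (smBitCond V Vc pat i) := by
  have hpt : ∀ t, t < pat.length → smOkb src pat i t = smBitCond V Vc pat i t := by
    intro t ht
    have hu : i + t < src.length := by omega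
    simp only [smOkb, smBitCond, hV _ hu, hVc _ hu]
    rcases h0 : pat.getD t ' ' == '0' with _ | _ <;>
      rcases h1 : pat.getD t ' ' == '1' with _ | _ <;>
        rcases hv : decide (src.getD (i + t) ' ' ∈ pvVowels) with _ | _ <;>
          simp_all
  rw [Bool.eq_iff_iff]
  simp only [List.all_eq_true, List.mem_range]
  constructor
  · intro h t ht; rw [← hpt t ht]; exact h t ht
  · intro h t ht; rw [hpt t ht]; exact h t ht

-- ===== VERDICT (by name: the statement is the Claim_ definition above) =====
theorem string_pattern_matching_spec : Claim_equal_string_pattern_matching := by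
  intro source pattern _
  unfold Spec_string_pattern_matching string_pattern_matching string_pattern_matching_alt
  simp only []
  set src := source.toList with hsrc
  set pat := pattern.toList with hpat
  by_cases hnm : (src.length : Int) < (pat.length : Int)
  · simp [hnm]
  · simp only [hnm, if_false]
    have hm : pat.length ≤ src.length := by exact_mod_cast not_lt.mp hnm
    set n := src.length
    set m := pat.length
    set W : Nat := n - m + 1 with hW
    -- A side: count of matching windows
    have hRange : PySem.List.pyRange 0 ((n : Int) - m + 1) 1
        = (List.range W).map (fun k => ((k : Nat) : Int)) := by
      rw [PySem.List.pyRange_one]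
      have : ((n : Int) - m + 1 - 0).toNat = W := by omega
      rw [this]
      simp
    have hA : (PySem.List.pyRange 0 ((n : Int) - m + 1) 1).foldl
        (fun count i => if smAInner src pat i (PySem.List.pyRange 0 (m : Int) 1) then count + 1 else count) (0 : Int)
        = ((List.range W).countP (fun i => (List.range m).all (smOkb src pat i)) : Int) := by
      rw [hRange, List.foldl_map, PySem.List.foldl_if_add_one]
      rw [List.countP_congr (fun i _ => by rw [smAInner_range src pat i])]
      simp only [zero_add]
      exact rfl
    rw [hA]
    -- B side
    set V := if n ≠ 0 then smBin ((src.map (fun c => if c ∈ pvVowels then '1' else '0')).reverse) else 0 with hVdef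
    set Vc := ((1 <<< n) - 1) ^^^ V with hVcdef
    set ok0 := (1 <<< W) - 1 with hok0
    have hVbits : ∀ u, u < n → V.testBit u = decide (src.getD u ' ' ∈ pvVowels) := by
      intro u hu
      have hn0 : n ≠ 0 := by omega
      rw [hVdef, if_pos hn0, smBin_rev_testBit]
      have hmap : (src.map (fun c => if c ∈ pvVowels then '1' else '0')).getD u '0'
          = (fun c => if c ∈ pvVowels then '1' else '0') (src.getD u ' ') := by
        rw [List.getD_eq_getElem?_getD, List.getElem?_map,
            List.getElem?_eq_getElem hu, List.getD_eq_getElem?_getD,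
            List.getElem?_eq_getElem hu]
        rfl
      rw [hmap]
      simp only [List.getD_eq_getElem?_getD]
      by_cases hmem : src[u]?.getD ' ' ∈ pvVowels <;> simp [hmem]
    have hVcbits : ∀ u, u < n → Vc.testBit u = !V.testBit u := by
      intro u hu
      rw [hVcdef, Nat.one_shiftLeft, Nat.testBit_xor, Nat.testBit_two_pow_sub_one]
      simp [hu]
    set okF := smBLoop V Vc pat 0 ok0 with hokF
    have hokFlt : okF < 2^W := by
      have h1 : okF ≤ ok0 := smBLoop_le V Vc pat 0 ok0
      have h2 : ok0 < 2^W := by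
        rw [hok0, Nat.one_shiftLeft]
        have : 0 < (2:Nat)^W := Nat.two_pow_pos W
        omega
      omega
    rw [smPopcount_eq_countP W okF hokFlt]
    have hbit : ∀ i, i < W → okF.testBit i = (List.range m).all (smOkb src pat i) := by
      intro i hi
      rw [hokF, smBLoop_testBit]
      have hok0bit : ok0.testBit i = true := by
        rw [hok0, Nat.one_shiftLeft, Nat.testBit_two_pow_sub_one]
        simp [hi]
      rw [hok0bit, Bool.true_and, Nat.add_zero]
      exact (smWindow_agree src pat V Vc hm hVbits hVcbits i (by omega)).symm
    have : (List.range W).countP (fun t => okF.testBit t)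
        = (List.range W).countP (fun i => (List.range m).all (smOkb src pat i)) := by
      apply List.countP_congr
      intro i hmem
      rw [List.mem_range] at hmem
      rw [hbit i hmem]
    rw [this]
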